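-- pv_equiv track=rewrite | github.com/kodsnack/advent_of_code_2023 | estomagordo-python/25.py | parse
-- ===== SOURCE A (Python) =====
-- from collections import Counter, defaultdict, deque
--
-- def find_critical_edges(graph):
--     edge_frequency = Counter()
--
--     for start in graph.keys():
--         preceeding = {}
--         frontier = [(start, None)]
--
--         for node, prev in frontier:
--             if node in preceeding:
--                 continue
--
--             preceeding[node] = prev
--
--             for next in graph[node]:
--                 if next not in preceeding:
--                     frontier.append((next, node))
--
--
--         for node in preceeding.keys():
--             while preceeding[node]:
--                 prev = preceeding[node]
--                 edge_frequency[(min(node, prev), max(node, prev))] += 1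
--                 node = prev
--
--     return {a: b for a, b in [p[0] for p in edge_frequency.most_common(3)]}
--
-- def parse(lines):
--     graph = defaultdict(list)
--
--     for line in lines:
--         parts = line.split()
--
--         a = parts[0][:-1]
--
--         for part in parts[1:]:
--             graph[a].append(part)
--             graph[part].append(a)
--
--     critical_edges = find_critical_edges(graph)
--
--     return graph, critical_edges
-- ===== SOURCE B (Python) =====
-- def bfs(graph, start):
--     preceding = {}
--     frontier = [(start, None)]
--     i = 0
--     while i < len(frontier):
--         node, prev = frontier[i]
--         i += 1
--         if node in preceding:
--             continue
--         preceding[node] = prev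
--         for nxt in graph[node]:
--             if nxt not in preceding:
--                 frontier.append((nxt, node))
--     return preceding
--
--
-- def find_critical_edges(graph):
--     edge_frequency = {}
--
--     for start in graph:
--         preceding = bfs(graph, start)
--
--         # A tree edge (node, prev) lies on the root-path of exactly the nodes of
--         # node's subtree, so one bottom-up size pass replaces all root-walks.
--         order = list(preceding)
--         size = dict.fromkeys(order, 1)
--         for node in reversed(order):
--             prev = preceding[node]
--             if prev:
--                 size[prev] += size[node]
--
--         for node in order:
--             prev = preceding[node]
--             if prev:
--                 edge = (node, prev) if node < prev else (prev, node)
--                 edge_frequency[edge] = edge_frequency.get(edge, 0) + size[node]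
--
--     top3 = sorted(edge_frequency.items(), key=lambda kv: kv[1], reverse=True)[:3]
--     return {a: b for (a, b), _ in top3}
--
--
-- def parse(lines):
--     edges = []
--     for line in lines:
--         parts = line.split()
--         a = parts[0][:-1]
--         edges.extend((a, p) for p in parts[1:])
--
--     graph = {}
--     for a, b in edges:
--         graph.setdefault(a, []).append(b)
--         graph.setdefault(b, []).append(a)
--
--     return graph, find_critical_edges(graph)
-- ===== Notes on version B (the rewrite author's own statement) =====
-- stated objective: alternative
-- what changed: A tallies each spanning-tree edge by walking every node's full path to the BFS root (a third nested pass per start); B replaces all those root-walks with one bottom-up subtree-size pass (adding size[node] to edge (node, parent) in a single sweep) and takes the top 3 by one stable descending sort; B also builds the graph from a flat edge list into a plain dict via setdefault and runs the BFS as an index-pointer loop returning the parent map.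
import Mathlib
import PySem

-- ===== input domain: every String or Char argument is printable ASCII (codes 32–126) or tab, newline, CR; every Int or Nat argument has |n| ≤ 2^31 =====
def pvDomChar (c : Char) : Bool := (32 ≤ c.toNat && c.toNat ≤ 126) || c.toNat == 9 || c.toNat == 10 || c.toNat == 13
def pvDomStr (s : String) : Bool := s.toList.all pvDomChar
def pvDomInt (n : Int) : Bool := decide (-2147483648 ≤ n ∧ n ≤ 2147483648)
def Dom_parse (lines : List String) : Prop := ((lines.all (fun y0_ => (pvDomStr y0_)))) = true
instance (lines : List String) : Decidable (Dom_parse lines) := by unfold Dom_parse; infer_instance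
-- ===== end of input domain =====

-- B replaces A's per-node walk-to-the-root tally by one bottom-up subtree-size pass per
-- BFS tree (the edge (node, parent) lies on the root path of exactly the nodes of node's
-- subtree); B also builds the graph from a flat edge list into a plain dict and runs the
-- BFS as an index-pointer loop.  Objective: alternative (a different counting algorithm).

def pvMin (a b : String) : String := if b < a then b else a
def pvMax (a b : String) : String := if a < b then b else a

-- ===== PORT A =====
def buildGraphA (lines : List String) : PySem.Dict String (List String) :=
  lines.foldl (fun g line =>
    match PySem.Str.split₀ line with
    | [] => g
    | p0 :: rest =>
      let a := PySem.Str.slice p0 none (some (-1))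
      rest.foldl (fun g part =>
        PySem.Dict.modify (PySem.Dict.modify g a [] (· ++ [part])) part [] (· ++ [a])) g)
    PySem.Dict.empty

def bfsFuelA (graph : PySem.Dict String (List String)) : Nat :=
  1 + ((PySem.Dict.values graph).map List.length).sum

-- the 'for node, prev in frontier' loop of find_critical_edges (the frontier list is
-- consumed from the front while appends go to the back); the fuel bounds the number of
-- iterations, 1 + sum of all adjacency-list lengths always suffices (each key is
-- expanded at most once, so at most deg(k) entries are ever appended per key k)
def bfsA (graph : PySem.Dict String (List String)) :
    Nat → List (String × Option String) → PySem.Dict String (Option String) →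
    PySem.Dict String (Option String)
  | 0, _, prec => prec
  | _ + 1, [], prec => prec
  | f + 1, (node, prev) :: rest, prec =>
    if PySem.Dict.contains prec node then bfsA graph f rest prec
    else
      let prec' := PySem.Dict.insert prec node prev
      bfsA graph f
        (rest ++ ((PySem.Dict.getD graph node []).filter
            (fun nx => !(PySem.Dict.contains prec' nx))).map (fun nx => (nx, some node)))
        prec'

-- the 'while preceeding[node]:' walk (an Option String value is truthy iff it is
-- some p with p ≠ ""); fuel = size of preceeding always suffices since the parent
-- of a node was inserted strictly earlier
def walkA (prec : PySem.Dict String (Option String)) :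
    Nat → PySem.Dict (String × String) Int → String → PySem.Dict (String × String) Int
  | 0, freq, _ => freq
  | f + 1, freq, node =>
    match PySem.Dict.get? prec node with
    | some (some p) =>
      if p = "" then freq
      else walkA prec f (PySem.Dict.modify freq (pvMin node p, pvMax node p) 0 (· + 1)) p
    | _ => freq

def findCriticalA (graph : PySem.Dict String (List String)) : PySem.Dict String String :=
  let freq := (PySem.Dict.keys graph).foldl (fun freq start =>
    let prec := bfsA graph (bfsFuelA graph) [(start, none)] PySem.Dict.empty
    (PySem.Dict.keys prec).foldl (fun freq node => walkA prec (PySem.Dict.size prec) freq node) freq)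
    PySem.Dict.empty
  -- Counter.most_common(3) = stable sort by count, descending, take 3
  let top := (PySem.List.sorted (PySem.Dict.items freq) (fun p => p.2) true).take 3
  (top.map (fun p => p.1)).foldl (fun d ab => PySem.Dict.insert d ab.1 ab.2) PySem.Dict.empty

def parse (lines : List String) : (List (String × List String)) × (List (String × String)) :=
  let graph := buildGraphA lines
  (PySem.Dict.items graph, PySem.Dict.items (findCriticalA graph))

-- ===== PORT B =====
-- the flat edge list 'edges' of Source B
def edgesB (lines : List String) : List (String × String) :=
  lines.flatMap (fun ln =>
    match PySem.Str.split₀ ln with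
    | [] => []
    | h0 :: tl => tl.map (fun w => (PySem.Str.slice h0 none (some (-1)), w)))

-- adj.setdefault(x, []).append(y) on a plain dict
def addAdjB (gr : PySem.Dict String (List String)) (x y : String) :
    PySem.Dict String (List String) :=
  match PySem.Dict.get? gr x with
  | some l => PySem.Dict.insert gr x (l ++ [y])
  | none => PySem.Dict.insert gr x [y]

def buildGraphB (lines : List String) : PySem.Dict String (List String) :=
  (edgesB lines).foldl (fun gr ed => addAdjB (addAdjB gr ed.1 ed.2) ed.2 ed.1) PySem.Dict.empty

def bfsFuelB (adj : PySem.Dict String (List String)) : Nat :=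
  adj.items.foldl (fun s kv => s + kv.2.length) 1

-- Source B's 'while i < len(frontier)' loop: the frontier is kept whole and read through
-- the index pointer i; the fuel bounds the number of iterations as in bfsFuelA
def bfsB (adj : PySem.Dict String (List String)) :
    Nat → List (String × Option String) → Nat → PySem.Dict String (Option String) →
    PySem.Dict String (Option String)
  | 0, _, _, par => par
  | f + 1, front, i, par =>
    if h : i < front.length then
      if PySem.Dict.contains par (front[i]).1 then bfsB adj f front (i + 1) par
      else
        let par' := PySem.Dict.insert par (front[i]).1 (front[i]).2
        bfsB adj f
          ((PySem.Dict.getD adj (front[i]).1 []).foldl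
            (fun fr nxt => if !(PySem.Dict.contains par' nxt) then fr ++ [(nxt, some (front[i]).1)] else fr)
            front)
          (i + 1) par'
    else par

-- size = dict.fromkeys(order, 1), then the bottom-up pass over reversed(order)
def sizesB (par : PySem.Dict String (Option String)) : PySem.Dict String Int :=
  let order := PySem.Dict.keys par
  let sz := PySem.Dict.ofList (order.map (fun n => (n, (1 : Int))))
  order.reverse.foldl (fun sz nd =>
    match PySem.Dict.get? par nd with
    | some (some w) =>
      if w = "" then sz
      else PySem.Dict.modify sz w 0 (· + PySem.Dict.getD sz nd 0)
    | _ => sz) sz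

def addStartB (par : PySem.Dict String (Option String)) (sz : PySem.Dict String Int)
    (ef : PySem.Dict (String × String) Int) : PySem.Dict (String × String) Int :=
  (PySem.Dict.keys par).foldl (fun ef nd =>
    match PySem.Dict.get? par nd with
    | some (some w) =>
      if w = "" then ef
      else
        let ed := if nd < w then (nd, w) else (w, nd)
        PySem.Dict.insert ef ed (PySem.Dict.getD ef ed 0 + PySem.Dict.getD sz nd 0)
    | _ => ef) ef

def findCriticalB (adj : PySem.Dict String (List String)) : PySem.Dict String String :=
  let ef := (PySem.Dict.keys adj).foldl (fun ef st =>
    let par := bfsB adj (bfsFuelB adj) [(st, none)] 0 PySem.Dict.empty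
    addStartB par (sizesB par) ef) PySem.Dict.empty
  PySem.Dict.ofList (((PySem.List.sorted (PySem.Dict.items ef) (fun kv => kv.2) true).take 3).map (fun kv => kv.1))

def parse_alt (lines : List String) : (List (String × List String)) × (List (String × String)) :=
  let adj := buildGraphB lines
  (PySem.Dict.items adj, PySem.Dict.items (findCriticalB adj))

-- ===== PRECONDITION & SPEC =====
-- Pre_ excludes only lines that split into no words (empty / all-whitespace lines),
-- on which A raises IndexError at parts[0].
def Pre_parse (lines : List String) : Prop :=
  ∀ line ∈ lines, PySem.Str.split₀ line ≠ []
instance (lines : List String) : Decidable (Pre_parse lines) := by unfold Pre_parse; infer_instance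

def pvWitness_parse : List String := ["a: b c", "b: c", "x: y"]

def Spec_parse (lines : List String) (out : (List (String × List String)) × (List (String × String))) : Prop := out = parse_alt lines
instance (lines : List String) (out : (List (String × List String)) × (List (String × String))) : Decidable (Spec_parse lines out) := by unfold Spec_parse; infer_instance

-- ===== CLAIM (what is proved, stated in full; the proofs are below) =====
def Claim_equal_parse : Prop := ∀ (lines : List String), Dom_parse lines → Pre_parse lines → Spec_parse lines (parse lines)

-- ===== LEMMAS AND PROOFS =====

theorem pvFoldlFunext {α β : Type} {f g : α → β → α} (h : ∀ a b, f a b = g a b) :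
    ∀ (l : List β) (init : α), l.foldl f init = l.foldl g init := by
  intro l
  induction l with
  | nil => intro init; rfl
  | cons x t ih => intro init; rw [List.foldl_cons, List.foldl_cons, h]; exact ih _

-- the two graph builds agree: B's per-edge setdefault/append step is A's modify
theorem addAdjB_eq (g : PySem.Dict String (List String)) (x y : String) :
    addAdjB g x y = PySem.Dict.modify g x [] (· ++ [y]) := by
  unfold addAdjB PySem.Dict.modify
  cases h : PySem.Dict.get? g x <;> simp [h, PySem.Dict.getD_eq_get?_getD]

theorem buildGraphB_eq (lines : List String) : buildGraphB lines = buildGraphA lines := by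
  unfold buildGraphB buildGraphA edgesB
  generalize (PySem.Dict.empty : PySem.Dict String (List String)) = g0
  induction lines generalizing g0 with
  | nil => rfl
  | cons line t ih =>
    rw [List.flatMap_cons, List.foldl_append, List.foldl_cons]
    cases h : PySem.Str.split₀ line with
    | nil => simp only [h, List.foldl_nil]; exact ih g0
    | cons p0 rest =>
      simp only [h, List.foldl_map]
      rw [pvFoldlFunext (fun g part => by rw [addAdjB_eq, addAdjB_eq]) rest g0]
      exact ih _

theorem bfsFuelB_eq (graph : PySem.Dict String (List String)) :
    bfsFuelB graph = bfsFuelA graph := by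
  unfold bfsFuelB bfsFuelA PySem.Dict.values
  have gen : ∀ (L : List (String × List String)) (n : Nat),
      L.foldl (fun s kv => s + kv.2.length) n = n + ((L.map Prod.snd).map List.length).sum := by
    intro L
    induction L with
    | nil => intro n; simp
    | cons kv t ih =>
      intro n
      rw [List.foldl_cons, ih, List.map_cons, List.map_cons, List.sum_cons]
      omega
  exact gen _ 1

-- B's index-pointer loop is A's queue: the queue is the frontier from position i on
theorem bfsB_drop (graph : PySem.Dict String (List String)) (f : Nat)
    (front : List (String × Option String)) (i : Nat)
    (par : PySem.Dict String (Option String)) (hi : i ≤ front.length) :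
    bfsB graph f front i par = bfsA graph f (front.drop i) par := by
  induction f generalizing front i par with
  | zero => rfl
  | succ f ih =>
    by_cases h : i < front.length
    · rcases hfe : front[i] with ⟨node, prev⟩
      have hdrop : front.drop i = (node, prev) :: front.drop (i + 1) := by
        rw [List.drop_eq_getElem_cons h, hfe]
      rw [hdrop]
      simp only [bfsB, bfsA, dif_pos h, hfe]
      by_cases hc : PySem.Dict.contains par node = true
      · rw [if_pos hc, if_pos hc]
        exact ih front (i + 1) par (by omega)
      · rw [if_neg hc, if_neg hc]
        rw [PySem.List.foldl_append_if
          (fun nx => !(PySem.Dict.contains (PySem.Dict.insert par node prev) nx))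
          (fun nx => (nx, some node)) _ front]
        rw [ih _ (i + 1) _ (by simp; omega)]
        rw [List.drop_append_of_le_length (by omega)]
    · have hieq : front.drop i = [] := List.drop_eq_nil_of_le (by omega)
      rw [hieq]
      simp only [bfsB, bfsA, dif_neg h]

-- ===== proof-only helper definitions =====

def effPar (prec : PySem.Dict String (Option String)) (n : String) : Option String :=
  match prec.get? n with
  | some (some p) => if p = "" then none else some p
  | _ => none

def edgeOf (n p : String) : String × String := (pvMin n p, pvMax n p)

def chainOps (prec : PySem.Dict String (Option String)) :
    Nat → String → List ((String × String) × Int)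
  | 0, _ => []
  | f + 1, n =>
    match effPar prec n with
    | some p => (edgeOf n p, 1) :: chainOps prec f p
    | none => []

def nodeChain (prec : PySem.Dict String (Option String)) : Nat → String → List String
  | 0, n => [n]
  | f + 1, n =>
    n :: (match effPar prec n with
          | some p => nodeChain prec f p
          | none => [])

def applyOps (freq : PySem.Dict (String × String) Int)
    (ops : List ((String × String) × Int)) : PySem.Dict (String × String) Int :=
  ops.foldl (fun d q => PySem.Dict.modify d q.1 0 (· + q.2)) freq

def opsTotal (ops : List ((String × String) × Int)) (e : String × String) : Int :=
  ((ops.filter (fun q => q.1 == e)).map (fun q => q.2)).sum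

def opsB (prec : PySem.Dict String (Option String)) (sz : PySem.Dict String Int) :
    List ((String × String) × Int) :=
  prec.keys.filterMap (fun n => (effPar prec n).map (fun p => (edgeOf n p, sz.getD n 0)))

def Rcnt (prec : PySem.Dict String (Option String)) (v : String) : Int :=
  (prec.keys.countP (fun n => (nodeChain prec prec.size n).contains v) : Int)

def GoodPrec (prec : PySem.Dict String (Option String)) : Prop :=
  prec.keys.Nodup ∧
  ∀ i (h : i < prec.items.length) p, (prec.items[i]).2 = some p →
    p ∈ (prec.items.take i).map Prod.fst

-- ===== basic facts =====

theorem pair_eq_edgeOf (n p : String) :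
    (if n < p then (n, p) else (p, n)) = edgeOf n p := by
  unfold edgeOf pvMin pvMax
  by_cases h : n < p
  · rw [if_pos h, if_neg (lt_asymm h), if_pos h]
  · rw [if_neg h]
    by_cases h2 : p < n
    · rw [if_pos h2, if_neg h]
    · have : p = n := le_antisymm (not_lt.1 h) (not_lt.1 h2)
      subst this
      simp

theorem idxOf_lt_of_mem_take {α : Type} [BEq α] [LawfulBEq α] {l : List α} {i : Nat} {a : α}
    (h : a ∈ l.take i) : l.idxOf a < i := by
  induction l generalizing i with
  | nil => simp at h
  | cons x t ih =>
    cases i with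
    | zero => simp at h
    | succ j =>
      simp only [List.take_succ_cons, List.mem_cons] at h
      rcases h with h | h
      · subst h; simp
      · by_cases hx : x = a
        · subst hx; simp
        · have he : (x::t).idxOf a = t.idxOf a + 1 := by simp [hx]
          rw [he]
          exact Nat.succ_lt_succ (ih h)

theorem mem_take_of_idxOf_lt {α : Type} [BEq α] [LawfulBEq α] {l : List α} {i : Nat} {a : α}
    (hm : a ∈ l) (h : l.idxOf a < i) : a ∈ l.take i := by
  induction l generalizing i with
  | nil => simp at hm
  | cons x t ih =>
    cases i with
    | zero => omega
    | succ j =>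
      rw [List.take_succ_cons]
      by_cases hx : x = a
      · exact hx ▸ List.mem_cons_self
      · rcases List.mem_cons.1 hm with h1 | h1
        · exact absurd h1.symm hx
        · have he : (x::t).idxOf a = t.idxOf a + 1 := by simp [hx]
          rw [he] at h
          exact List.mem_cons_of_mem _ (ih h1 (by omega))

theorem gp_effPar {prec : PySem.Dict String (Option String)} (hg : GoodPrec prec)
    {n p : String} (hn : n ∈ prec.keys) (hp : effPar prec n = some p) :
    p ∈ prec.keys ∧ prec.keys.idxOf p < prec.keys.idxOf n := by
  have hnd := hg.1
  have hget : prec.get? n = some (some p) ∧ p ≠ "" := by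
    unfold effPar at hp
    cases hg' : prec.get? n with
    | none => rw [hg'] at hp; simp at hp
    | some v =>
      cases v with
      | none => rw [hg'] at hp; simp at hp
      | some q =>
        rw [hg'] at hp
        by_cases hq : q = ""
        · simp [hq] at hp
        · simp only [hq, if_false, Option.some.injEq] at hp; subst hp; exact ⟨rfl, hq⟩
  have hmem : (n, some p) ∈ prec.items :=
    (PySem.Dict.get?_eq_some_iff_mem_items prec n (some p) hnd).1 hget.1
  obtain ⟨i, hi, hitem⟩ := List.mem_iff_getElem.1 hmem
  have hkl : prec.keys.length = prec.items.length := by simp [PySem.Dict.keys]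
  have hik : i < prec.keys.length := by omega
  have hkeysi : prec.keys[i]'hik = n := by
    simp [PySem.Dict.keys, hitem]
  have hidxn : prec.keys.idxOf n = i := by
    rw [← hkeysi]; exact hnd.idxOf_getElem i hik
  have htake : p ∈ (prec.items.take i).map Prod.fst := hg.2 i hi p (by rw [hitem])
  have htake' : p ∈ prec.keys.take i := by
    simpa [PySem.Dict.keys, List.map_take] using htake
  refine ⟨List.mem_of_mem_take htake', ?_⟩
  rw [hidxn]
  exact idxOf_lt_of_mem_take htake'

theorem chainOps_norm {prec : PySem.Dict String (Option String)} (hg : GoodPrec prec)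
    {n : String} (hn : n ∈ prec.keys) {f g : Nat}
    (hf : prec.keys.idxOf n < f) (hgg : prec.keys.idxOf n < g) :
    chainOps prec f n = chainOps prec g n := by
  have aux : ∀ m : Nat, ∀ n, n ∈ prec.keys → prec.keys.idxOf n = m →
      ∀ f g, m < f → m < g → chainOps prec f n = chainOps prec g n := by
    intro m
    induction m using Nat.strong_induction_on with
    | _ m ih =>
      intro n hn hm f g hf hgg
      obtain ⟨f, rfl⟩ : ∃ f', f = f' + 1 := ⟨f - 1, by omega⟩
      obtain ⟨g, rfl⟩ : ∃ g', g = g' + 1 := ⟨g - 1, by omega⟩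
      cases hp : effPar prec n with
      | none => simp [chainOps, hp]
      | some p =>
        obtain ⟨hpk, hlt⟩ := gp_effPar hg hn hp
        simp only [chainOps, hp]
        rw [ih (prec.keys.idxOf p) (by omega) p hpk rfl f g (by omega) (by omega)]
  exact aux (prec.keys.idxOf n) n hn rfl f g hf hgg

theorem nodeChain_norm {prec : PySem.Dict String (Option String)} (hg : GoodPrec prec)
    {n : String} (hn : n ∈ prec.keys) {f g : Nat}
    (hf : prec.keys.idxOf n < f) (hgg : prec.keys.idxOf n < g) :
    nodeChain prec f n = nodeChain prec g n := by
  have aux : ∀ m : Nat, ∀ n, n ∈ prec.keys → prec.keys.idxOf n = m →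
      ∀ f g, m < f → m < g → nodeChain prec f n = nodeChain prec g n := by
    intro m
    induction m using Nat.strong_induction_on with
    | _ m ih =>
      intro n hn hm f g hf hgg
      obtain ⟨f, rfl⟩ : ∃ f', f = f' + 1 := ⟨f - 1, by omega⟩
      obtain ⟨g, rfl⟩ : ∃ g', g = g' + 1 := ⟨g - 1, by omega⟩
      cases hp : effPar prec n with
      | none => simp [nodeChain, hp]
      | some p =>
        obtain ⟨hpk, hlt⟩ := gp_effPar hg hn hp
        simp only [nodeChain, hp]
        rw [ih (prec.keys.idxOf p) (by omega) p hpk rfl f g (by omega) (by omega)]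
  exact aux (prec.keys.idxOf n) n hn rfl f g hf hgg

theorem idx_lt_size {prec : PySem.Dict String (Option String)} {n : String}
    (hn : n ∈ prec.keys) : prec.keys.idxOf n < prec.size := by
  have h := List.idxOf_lt_length_of_mem hn
  simpa [PySem.Dict.keys, PySem.Dict.size] using h

theorem chainOps_step {prec : PySem.Dict String (Option String)} (hg : GoodPrec prec)
    {n p : String} (hn : n ∈ prec.keys) (hp : effPar prec n = some p) :
    chainOps prec prec.size n = (edgeOf n p, 1) :: chainOps prec prec.size p := by
  have hN := idx_lt_size hn
  obtain ⟨N, hNe⟩ : ∃ N', prec.size = N' + 1 := ⟨prec.size - 1, by omega⟩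
  obtain ⟨hpk, hlt⟩ := gp_effPar hg hn hp
  have hpN := idx_lt_size hpk
  calc chainOps prec prec.size n = chainOps prec (N + 1) n := by rw [hNe]
    _ = (edgeOf n p, 1) :: chainOps prec N p := by simp [chainOps, hp]
    _ = (edgeOf n p, 1) :: chainOps prec prec.size p := by
        rw [chainOps_norm hg hpk (by omega) hpN]

theorem chainOps_none {prec : PySem.Dict String (Option String)} {n : String}
    (hn : n ∈ prec.keys) (hp : effPar prec n = none) :
    chainOps prec prec.size n = [] := by
  have hN := idx_lt_size hn
  obtain ⟨N, hNe⟩ : ∃ N', prec.size = N' + 1 := ⟨prec.size - 1, by omega⟩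
  rw [hNe]
  simp [chainOps, hp]

theorem nodeChain_step {prec : PySem.Dict String (Option String)} (hg : GoodPrec prec)
    {n p : String} (hn : n ∈ prec.keys) (hp : effPar prec n = some p) :
    nodeChain prec prec.size n = n :: nodeChain prec prec.size p := by
  have hN := idx_lt_size hn
  obtain ⟨N, hNe⟩ : ∃ N', prec.size = N' + 1 := ⟨prec.size - 1, by omega⟩
  obtain ⟨hpk, hlt⟩ := gp_effPar hg hn hp
  have hpN := idx_lt_size hpk
  calc nodeChain prec prec.size n = nodeChain prec (N + 1) n := by rw [hNe]
    _ = n :: nodeChain prec N p := by simp [nodeChain, hp]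
    _ = n :: nodeChain prec prec.size p := by
        rw [nodeChain_norm hg hpk (by omega) hpN]

theorem nodeChain_none {prec : PySem.Dict String (Option String)} {n : String}
    (hn : n ∈ prec.keys) (hp : effPar prec n = none) :
    nodeChain prec prec.size n = [n] := by
  have hN := idx_lt_size hn
  obtain ⟨N, hNe⟩ : ∃ N', prec.size = N' + 1 := ⟨prec.size - 1, by omega⟩
  rw [hNe]
  simp [nodeChain, hp]

theorem mem_nodeChain_self {prec : PySem.Dict String (Option String)} {n : String}
    (hn : n ∈ prec.keys) : n ∈ nodeChain prec prec.size n := by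
  have hN := idx_lt_size hn
  obtain ⟨N, hNe⟩ : ∃ N', prec.size = N' + 1 := ⟨prec.size - 1, by omega⟩
  rw [hNe]
  cases hp : effPar prec n <;> simp [nodeChain, hp]

theorem mem_nodeChain_le {prec : PySem.Dict String (Option String)} (hg : GoodPrec prec)
    {n c : String} (hn : n ∈ prec.keys) (hc : c ∈ nodeChain prec prec.size n) :
    c ∈ prec.keys ∧ prec.keys.idxOf c ≤ prec.keys.idxOf n := by
  have aux : ∀ m : Nat, ∀ n, n ∈ prec.keys → prec.keys.idxOf n = m →
      ∀ c, c ∈ nodeChain prec prec.size n →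
      c ∈ prec.keys ∧ prec.keys.idxOf c ≤ prec.keys.idxOf n := by
    intro m
    induction m using Nat.strong_induction_on with
    | _ m ih =>
      intro n hn hm c hc
      cases hp : effPar prec n with
      | none =>
        rw [nodeChain_none hn hp] at hc
        simp at hc
        subst hc
        exact ⟨hn, le_refl _⟩
      | some p =>
        obtain ⟨hpk, hlt⟩ := gp_effPar hg hn hp
        rw [nodeChain_step hg hn hp] at hc
        rcases List.mem_cons.1 hc with h | h
        · subst h; exact ⟨hn, le_refl _⟩
        · obtain ⟨h1, h2⟩ := ih (prec.keys.idxOf p) (by omega) p hpk rfl c h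
          exact ⟨h1, by omega⟩
  exact aux (prec.keys.idxOf n) n hn rfl c hc

theorem nodeChain_suffix {prec : PySem.Dict String (Option String)} (hg : GoodPrec prec)
    {n c : String} (hn : n ∈ prec.keys) (hc : c ∈ nodeChain prec prec.size n) :
    nodeChain prec prec.size c <:+ nodeChain prec prec.size n := by
  have aux : ∀ m : Nat, ∀ n, n ∈ prec.keys → prec.keys.idxOf n = m →
      ∀ c, c ∈ nodeChain prec prec.size n →
      nodeChain prec prec.size c <:+ nodeChain prec prec.size n := by
    intro m
    induction m using Nat.strong_induction_on with
    | _ m ih =>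
      intro n hn hm c hc
      cases hp : effPar prec n with
      | none =>
        rw [nodeChain_none hn hp] at hc ⊢
        simp at hc
        subst hc
        rw [nodeChain_none hn hp]
      | some p =>
        obtain ⟨hpk, hlt⟩ := gp_effPar hg hn hp
        rw [nodeChain_step hg hn hp] at hc ⊢
        rcases List.mem_cons.1 hc with h | h
        · subst h
          rw [nodeChain_step hg hn hp]
        · exact (ih (prec.keys.idxOf p) (by omega) p hpk rfl c h).trans
            (List.suffix_cons _ _)
  exact aux (prec.keys.idxOf n) n hn rfl c hc

theorem edgeOf_inj {prec : PySem.Dict String (Option String)} (hg : GoodPrec prec)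
    {c1 c2 p1 p2 : String} (h1 : c1 ∈ prec.keys) (h2 : c2 ∈ prec.keys)
    (hp1 : effPar prec c1 = some p1) (hp2 : effPar prec c2 = some p2)
    (he : edgeOf c1 p1 = edgeOf c2 p2) : c1 = c2 := by
  obtain ⟨hk1, hl1⟩ := gp_effPar hg h1 hp1
  obtain ⟨hk2, hl2⟩ := gp_effPar hg h2 hp2
  unfold edgeOf pvMin pvMax at he
  rw [Prod.mk.injEq] at he
  obtain ⟨f1, f2⟩ := he
  have t1 : p1 ≠ c1 := fun h => by rw [h] at hl1; omega
  have t2 : p2 ≠ c2 := fun h => by rw [h] at hl2; omega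
  rcases lt_trichotomy p1 c1 with a1 | a1 | a1
  · rcases lt_trichotomy p2 c2 with a2 | a2 | a2
    · rw [if_neg (lt_asymm a1), if_neg (lt_asymm a2)] at f2
      exact f2
    · exact absurd a2 t2
    · rw [if_pos a1, if_neg (lt_asymm a2)] at f1
      rw [if_neg (lt_asymm a1), if_pos a2] at f2
      exfalso
      rw [f1] at hl1
      rw [f2] at hl1
      omega
  · exact absurd a1 t1
  · rcases lt_trichotomy p2 c2 with a2 | a2 | a2
    · rw [if_neg (lt_asymm a1), if_pos a2] at f1
      rw [if_pos a1, if_neg (lt_asymm a2)] at f2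
      exfalso
      rw [f2] at hl1
      rw [f1] at hl1
      omega
    · exact absurd a2 t2
    · rw [if_neg (lt_asymm a1), if_neg (lt_asymm a2)] at f1
      exact f1

theorem chainOps_count {prec : PySem.Dict String (Option String)} (hg : GoodPrec prec)
    {v pv : String} (hv : v ∈ prec.keys) (hpv : effPar prec v = some pv)
    {n : String} (hn : n ∈ prec.keys) :
    ((chainOps prec prec.size n).map (fun q => q.1)).count (edgeOf v pv) =
      (if v ∈ nodeChain prec prec.size n then 1 else 0) := by
  have aux : ∀ m : Nat, ∀ n, n ∈ prec.keys → prec.keys.idxOf n = m →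
      ((chainOps prec prec.size n).map (fun q => q.1)).count (edgeOf v pv) =
        (if v ∈ nodeChain prec prec.size n then 1 else 0) := by
    intro m
    induction m using Nat.strong_induction_on with
    | _ m ih =>
      intro n hn hm
      cases hp : effPar prec n with
      | none =>
        rw [chainOps_none hn hp, nodeChain_none hn hp]
        have hvn : v ≠ n := by
          intro h; rw [h] at hpv; rw [hpv] at hp; cases hp
        simp [hvn]
      | some q =>
        obtain ⟨hqk, hlt⟩ := gp_effPar hg hn hp
        rw [chainOps_step hg hn hp, nodeChain_step hg hn hp]
        simp only [List.map_cons, List.count_cons]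
        rw [ih (prec.keys.idxOf q) (by omega) q hqk rfl]
        by_cases hnv : n = v
        · have hq : q = pv := by rw [hnv] at hp; rw [hp] at hpv; injection hpv
          have hnot : v ∉ nodeChain prec prec.size q := by
            intro hmem
            have h2 := (mem_nodeChain_le hg hqk hmem).2
            rw [← hnv] at h2
            omega
          have hedge : edgeOf n q = edgeOf v pv := by rw [hnv, hq]
          rw [if_neg hnot, hedge]
          have hmm : v ∈ n :: nodeChain prec prec.size q := by
            rw [hnv]; exact List.mem_cons_self
          rw [if_pos hmm]
          simp
        · have hne : edgeOf n q ≠ edgeOf v pv := fun h =>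
            hnv (edgeOf_inj hg hn hv hp hpv h)
          have : v ∈ n :: nodeChain prec prec.size q ↔ v ∈ nodeChain prec prec.size q := by
            constructor
            · intro h
              rcases List.mem_cons.1 h with h | h
              · exact absurd h.symm hnv
              · exact h
            · exact fun h => List.mem_cons_of_mem _ h
          rw [if_congr this rfl rfl]
          simp [hne]
  exact aux (prec.keys.idxOf n) n hn rfl

theorem reach_unique_child {prec : PySem.Dict String (Option String)} (hg : GoodPrec prec)
    {n v c1 c2 : String} (hn : n ∈ prec.keys)
    (hp1 : effPar prec c1 = some v) (hp2 : effPar prec c2 = some v)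
    (r1 : c1 ∈ nodeChain prec prec.size n) (r2 : c2 ∈ nodeChain prec prec.size n) :
    c1 = c2 := by
  have hk1 := (mem_nodeChain_le hg hn r1).1
  have hk2 := (mem_nodeChain_le hg hn r2).1
  obtain ⟨hvk1, hl1⟩ := gp_effPar hg hk1 hp1
  obtain ⟨hvk2, hl2⟩ := gp_effPar hg hk2 hp2
  have s1 := nodeChain_suffix hg hn r1
  have s2 := nodeChain_suffix hg hn r2
  have hstep1 := nodeChain_step hg hk1 hp1
  have hstep2 := nodeChain_step hg hk2 hp2
  rcases List.suffix_or_suffix_of_suffix s1 s2 with hss | hss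
  · have : c1 ∈ nodeChain prec prec.size c2 := hss.mem (by rw [hstep1]; exact List.mem_cons_self)
    rw [hstep2] at this
    rcases List.mem_cons.1 this with h | h
    · exact h
    · exfalso
      have := (mem_nodeChain_le hg hvk2 h).2
      omega
  · have : c2 ∈ nodeChain prec prec.size c1 := hss.mem (by rw [hstep2]; exact List.mem_cons_self)
    rw [hstep1] at this
    rcases List.mem_cons.1 this with h | h
    · exact h.symm
    · exfalso
      have := (mem_nodeChain_le hg hvk1 h).2
      omega

theorem countP_eq_one_unique {α : Type} {l : List α} {p : α → Bool} {c : α}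
    (hnd : l.Nodup) (hc : c ∈ l) (hpc : p c = true)
    (huniq : ∀ x ∈ l, p x = true → x = c) : l.countP p = 1 := by
  induction l with
  | nil => simp at hc
  | cons x t ih =>
    rcases List.mem_cons.1 hc with h | h
    · subst h
      rw [List.countP_cons, List.countP_eq_zero.2, if_pos hpc]
      intro a ha hpa
      exact absurd ((huniq a (List.mem_cons_of_mem _ ha) hpa) ▸ ha) (List.nodup_cons.1 hnd).1
    · rw [List.countP_cons, ih (List.nodup_cons.1 hnd).2 h
        (fun y hy hpy => huniq y (List.mem_cons_of_mem _ hy) hpy)]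
      have hx : p x = false := by
        by_contra hpx
        have := huniq x List.mem_cons_self (by simpa using hpx)
        subst this
        exact (List.nodup_cons.1 hnd).1 h
      simp [hx]

theorem reach_child {prec : PySem.Dict String (Option String)} (hg : GoodPrec prec)
    {n v : String} (hn : n ∈ prec.keys) (hv : v ∈ nodeChain prec prec.size n)
    (hne : v ≠ n) :
    ∃ c, c ∈ prec.keys ∧ effPar prec c = some v ∧ c ∈ nodeChain prec prec.size n := by
  have aux : ∀ m : Nat, ∀ n, n ∈ prec.keys → prec.keys.idxOf n = m →
      v ∈ nodeChain prec prec.size n → v ≠ n →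
      ∃ c, c ∈ prec.keys ∧ effPar prec c = some v ∧ c ∈ nodeChain prec prec.size n := by
    intro m
    induction m using Nat.strong_induction_on with
    | _ m ih =>
      intro n hn hm hv hne
      cases hp : effPar prec n with
      | none =>
        rw [nodeChain_none hn hp] at hv
        simp at hv
        exact absurd hv hne
      | some q =>
        obtain ⟨hqk, hlt⟩ := gp_effPar hg hn hp
        rw [nodeChain_step hg hn hp] at hv
        rcases List.mem_cons.1 hv with h | h
        · exact absurd h hne
        · by_cases hvq : v = q
          · exact ⟨n, hn, by rw [hp, hvq], mem_nodeChain_self hn⟩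
          · obtain ⟨c, hc1, hc2, hc3⟩ := ih (prec.keys.idxOf q) (by omega) q hqk rfl h hvq
            exact ⟨c, hc1, hc2, by rw [nodeChain_step hg hn hp]; exact List.mem_cons_of_mem _ hc3⟩
  exact aux (prec.keys.idxOf n) n hn rfl hv hne

theorem reach_decomp {prec : PySem.Dict String (Option String)} (hg : GoodPrec prec)
    {v : String} (hv : v ∈ prec.keys)
    {n : String} (hn : n ∈ prec.keys) :
    (if v ∈ nodeChain prec prec.size n then 1 else 0) =
      (if n = v then 1 else 0) +
        ((prec.keys.filter (fun c => effPar prec c == some v)).countP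
          (fun c => (nodeChain prec prec.size n).contains c)) := by
  have hndk := hg.1
  have hndf : (prec.keys.filter (fun c => effPar prec c == some v)).Nodup :=
    hndk.filter _
  by_cases hmemv : v ∈ nodeChain prec prec.size n
  · rw [if_pos hmemv]
    by_cases hnv : n = v
    · rw [if_pos hnv]
      have hz : (prec.keys.filter (fun c => effPar prec c == some v)).countP
          (fun c => (nodeChain prec prec.size n).contains c) = 0 := by
        rw [List.countP_eq_zero]
        intro c hcmem hcc
        have hcf := List.mem_filter.1 hcmem
        have hpc : effPar prec c = some v := by simpa using hcf.2
        have hreach : c ∈ nodeChain prec prec.size n := by simpa using hcc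
        have h1 := (mem_nodeChain_le hg hn hreach).2
        obtain ⟨_, h2⟩ := gp_effPar hg hcf.1 hpc
        rw [hnv] at h1
        omega
      omega
    · rw [if_neg hnv]
      obtain ⟨c, hck, hcp, hcr⟩ := reach_child hg hn hmemv (fun h => hnv h.symm)
      have h1 : (prec.keys.filter (fun c => effPar prec c == some v)).countP
          (fun c => (nodeChain prec prec.size n).contains c) = 1 := by
        apply countP_eq_one_unique hndf (c := c)
        · exact List.mem_filter.2 ⟨hck, by simp [hcp]⟩
        · simpa using hcr
        · intro x hx hpx
          have hxf := List.mem_filter.1 hx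
          have hxp : effPar prec x = some v := by simpa using hxf.2
          have hxr : x ∈ nodeChain prec prec.size n := by simpa using hpx
          exact reach_unique_child hg hn hxp hcp hxr hcr
      omega
  · rw [if_neg hmemv]
    have hnv : ¬ (n = v) := fun h => hmemv (h ▸ mem_nodeChain_self hn)
    rw [if_neg hnv]
    have hz : (prec.keys.filter (fun c => effPar prec c == some v)).countP
        (fun c => (nodeChain prec prec.size n).contains c) = 0 := by
      rw [List.countP_eq_zero]
      intro c hcmem hcc
      have hcf := List.mem_filter.1 hcmem
      have hpc : effPar prec c = some v := by simpa using hcf.2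
      have hreach : c ∈ nodeChain prec prec.size n := by simpa using hcc
      apply hmemv
      have hsuf := nodeChain_suffix hg hn hreach
      exact hsuf.mem (by
        rw [nodeChain_step hg (mem_nodeChain_le hg hn hreach).1 hpc]
        exact List.mem_cons_of_mem _
          (mem_nodeChain_self (gp_effPar hg (mem_nodeChain_le hg hn hreach).1 hpc).1))
    omega

theorem Rcnt_rec {prec : PySem.Dict String (Option String)} (hg : GoodPrec prec)
    {v : String} (hv : v ∈ prec.keys) :
    Rcnt prec v = 1 +
      (((prec.keys.filter (fun c => effPar prec c == some v)).map (Rcnt prec)).sum) := by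
  have swap : ∀ {α β : Type} (l1 : List α) (l2 : List β) (r : α → β → Bool),
      (l1.map (fun a => ((l2.countP (r a)) : Int))).sum =
        (l2.map (fun b => ((l1.countP (fun a => r a b)) : Int))).sum := by
    intro α β l1 l2 r
    induction l1 with
    | nil => simp
    | cons a t ih =>
      simp only [List.map_cons, List.sum_cons, ih, List.countP_cons]
      have : (l2.map (fun b => ((t.countP (fun a => r a b) + if r a b then 1 else 0 : Nat) : Int))).sum
          = (l2.map (fun b => ((t.countP (fun a => r a b) : Int) + if r a b then (1 : Int) else 0))).sum := by
        apply congrArg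
        apply List.map_congr_left
        intro b _
        push_cast
        split_ifs <;> simp
      rw [this, PySem.List.sum_map_add_int l2 (fun b => ((t.countP (fun a => r a b)) : Int))
        (fun b => if r a b then (1:Int) else 0), PySem.List.sum_map_ite_one_zero]
      push_cast
      ring
  have point : ∀ (L : List String), (∀ n ∈ L, n ∈ prec.keys) →
      ((L.countP (fun n => (nodeChain prec prec.size n).contains v)) : Int) =
        ((L.countP (fun n => n == v)) : Int) +
        (L.map (fun n =>
          (((prec.keys.filter (fun c => effPar prec c == some v)).countP
            (fun c => (nodeChain prec prec.size n).contains c)) : Int))).sum := by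
    intro L hL
    induction L with
    | nil => simp
    | cons x t ih =>
      have hx : x ∈ prec.keys := hL x List.mem_cons_self
      have ht : ∀ n ∈ t, n ∈ prec.keys := fun n hn => hL n (List.mem_cons_of_mem _ hn)
      have iht := ih ht
      have hd := reach_decomp hg hv hx
      have hdI := congrArg (fun z : Nat => (z : Int)) hd
      simp only [Nat.cast_add, Nat.cast_ite, Nat.cast_one, Nat.cast_zero] at hdI
      simp only [List.countP_cons, List.map_cons, List.sum_cons]
      push_cast
      have e1 : ((if (nodeChain prec prec.size x).contains v = true then (1:Int) else 0)) =
          (if v ∈ nodeChain prec prec.size x then (1:Int) else 0) := by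
        by_cases hm : v ∈ nodeChain prec prec.size x
        · rw [if_pos hm, if_pos (by simpa using hm)]
        · rw [if_neg hm, if_neg (by simpa using hm)]
      have e2 : ((if (x == v) = true then (1:Int) else 0)) =
          (if x = v then (1:Int) else 0) := by
        by_cases hm : x = v
        · rw [if_pos hm, if_pos (by simpa using hm)]
        · rw [if_neg hm, if_neg (by simpa using hm)]
      rw [e1, e2]
      linarith [iht, hdI]
  have h1 := point prec.keys (fun _ h => h)
  have h2 : prec.keys.countP (fun n => n == v) = 1 := by
    have : prec.keys.countP (fun n => n == v) = prec.keys.count v := rfl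
    rw [this]
    exact List.count_eq_one_of_mem hg.1 hv
  rw [h2] at h1
  have h3 := swap prec.keys (prec.keys.filter (fun c => effPar prec c == some v))
    (fun n c => (nodeChain prec prec.size n).contains c)
  unfold Rcnt
  rw [h1, h3]
  have h4 : ((prec.keys.filter (fun c => effPar prec c == some v)).map
      (fun b => ((prec.keys.countP (fun a => (nodeChain prec prec.size a).contains b)) : Int))).sum
      = ((prec.keys.filter (fun c => effPar prec c == some v)).map (Rcnt prec)).sum := rfl
  rw [h4]
  push_cast
  ring

def szStep (prec : PySem.Dict String (Option String))
    (sz : PySem.Dict String Int) (node : String) : PySem.Dict String Int :=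
  match PySem.Dict.get? prec node with
  | some (some p) =>
    if p = "" then sz
    else PySem.Dict.modify sz p 0 (· + PySem.Dict.getD sz node 0)
  | _ => sz

def szInit (prec : PySem.Dict String (Option String)) : PySem.Dict String Int :=
  prec.keys.foldl (fun d n => PySem.Dict.insert d n 1) (PySem.Dict.empty : PySem.Dict String Int)

theorem sizesB_unfold (prec : PySem.Dict String (Option String)) :
    sizesB prec = prec.keys.reverse.foldl (szStep prec) (szInit prec) := by
  unfold sizesB szInit PySem.Dict.ofList PySem.Dict.update
  simp only [List.foldl_map]
  rfl

theorem szStep_effPar (prec : PySem.Dict String (Option String))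
    (sz : PySem.Dict String Int) (node : String) :
    szStep prec sz node =
      match effPar prec node with
      | some p => PySem.Dict.modify sz p 0 (· + PySem.Dict.getD sz node 0)
      | none => sz := by
  unfold szStep effPar
  cases h : prec.get? node with
  | none => rfl
  | some w =>
    cases w with
    | none => rfl
    | some p =>
      by_cases hp : p = "" <;> simp [hp]

theorem szInit_getD (L : List String) (d : PySem.Dict String Int) (v : String) :
    (L.foldl (fun d n => PySem.Dict.insert d n 1) d).getD v 0 =
      if v ∈ L then 1 else d.getD v 0 := by
  induction L generalizing d with
  | nil => simp
  | cons n t ih =>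
    simp only [List.foldl_cons, ih, PySem.Dict.getD_insert]
    by_cases h1 : v ∈ t
    · rw [if_pos h1, if_pos (List.mem_cons_of_mem _ h1)]
    · rw [if_neg h1]
      by_cases h2 : v = n
      · rw [if_pos h2, if_pos (by rw [h2]; exact List.mem_cons_self)]
      · rw [if_neg h2, if_neg (by intro h; rcases List.mem_cons.1 h with h | h
                                  · exact h2 h
                                  · exact h1 h)]

theorem sizes_inv {prec : PySem.Dict String (Option String)} (hg : GoodPrec prec) :
    ∀ (T P : List String), prec.keys = P ++ T →
    ∀ v ∈ prec.keys,
      (T.reverse.foldl (szStep prec) (szInit prec)).getD v 0 =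
        1 + ((T.filter (fun c => effPar prec c == some v)).map (Rcnt prec)).sum := by
  intro T
  induction T with
  | nil =>
    intro P hsplit v hv
    simp only [List.reverse_nil, List.foldl_nil, List.filter_nil, List.map_nil,
      List.sum_nil, add_zero]
    unfold szInit
    rw [szInit_getD]
    simp [hv]
  | cons x T ih =>
    intro P hsplit v hv
    have hsplit' : prec.keys = (P ++ [x]) ++ T := by simpa using hsplit
    have hx : x ∈ prec.keys := by rw [hsplit]; exact List.mem_append_right _ List.mem_cons_self
    have hidx : prec.keys.idxOf x = P.length := by
      have hlen : P.length < prec.keys.length := by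
        rw [hsplit, List.length_append]; simp
      have hget : prec.keys[P.length]'hlen = x := by
        rw [List.getElem_of_eq hsplit]
        rw [List.getElem_append_right (le_refl P.length)]
        simp
      rw [← hget]
      exact hg.1.idxOf_getElem _ _
    have hchildT : ∀ c ∈ prec.keys, effPar prec c = some x → c ∈ T := by
      intro c hc hpc
      obtain ⟨_, hlt⟩ := gp_effPar hg hc hpc
      rw [hidx] at hlt
      rw [hsplit'] at hc
      rcases List.mem_append.1 hc with h | h
      · exfalso
        have htake : P ++ [x] = prec.keys.take (P.length + 1) := by
          rw [hsplit']
          rw [List.take_left' (by simp)]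
        rw [htake] at h
        have := idxOf_lt_of_mem_take h
        omega
      · exact h
    rw [List.reverse_cons, List.foldl_append, List.foldl_cons, List.foldl_nil]
    rw [szStep_effPar]
    cases hp : effPar prec x with
    | none =>
      have hfeq : (x :: T).filter (fun c => effPar prec c == some v) =
          T.filter (fun c => effPar prec c == some v) := by
        rw [List.filter_cons]
        simp [hp]
      rw [hfeq]
      exact ih (P ++ [x]) hsplit' v hv
    | some p =>
      obtain ⟨hpk, hplt⟩ := gp_effPar hg hx hp
      have hstx : (T.reverse.foldl (szStep prec) (szInit prec)).getD x 0 = Rcnt prec x := by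
        rw [ih (P ++ [x]) hsplit' x hx]
        have hfK : prec.keys.filter (fun c => effPar prec c == some x) =
            T.filter (fun c => effPar prec c == some x) := by
          rw [hsplit']
          rw [List.filter_append]
          have : (P ++ [x]).filter (fun c => effPar prec c == some x) = [] := by
            rw [List.filter_eq_nil_iff]
            intro c hc hpc
            have hpc' : effPar prec c = some x := by simpa using hpc
            have hcK : c ∈ prec.keys := by rw [hsplit']; exact List.mem_append_left _ hc
            exact absurd (hchildT c hcK hpc') (by
              intro hcT
              exact (List.disjoint_of_nodup_append (by rw [← hsplit']; exact hg.1)) hc hcT)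
          rw [this, List.nil_append]
        rw [← hfK]
        exact (Rcnt_rec hg hx).symm
      rw [PySem.Dict.getD_modify]
      rw [hstx]
      rw [List.filter_cons]
      by_cases hvp : v = p
      · have hcond : (effPar prec x == some v) = true := by simp [hp, hvp]
        rw [if_pos hvp, hcond]
        simp only [if_true, List.map_cons, List.sum_cons]
        rw [ih (P ++ [x]) hsplit' p hpk, hvp]
        ring
      · have hcond : (effPar prec x == some v) = false := by
          simp only [hp, beq_iff_eq, Option.some.injEq]
          exact decide_eq_false (fun h => hvp h.symm)
        rw [if_neg hvp, hcond]
        simp only [Bool.false_eq_true, if_false]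
        exact ih (P ++ [x]) hsplit' v hv

theorem sizesB_eq_Rcnt {prec : PySem.Dict String (Option String)} (hg : GoodPrec prec)
    {v : String} (hv : v ∈ prec.keys) :
    (sizesB prec).getD v 0 = Rcnt prec v := by
  rw [sizesB_unfold]
  rw [sizes_inv hg prec.keys [] (by simp) v hv]
  exact (Rcnt_rec hg hv).symm

-- ===== applyOps =====

theorem applyOps_append (freq : PySem.Dict (String × String) Int)
    (l1 l2 : List ((String × String) × Int)) :
    applyOps freq (l1 ++ l2) = applyOps (applyOps freq l1) l2 := by
  simp [applyOps]

theorem opsTotal_append (l1 l2 : List ((String × String) × Int)) (e : String × String) :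
    opsTotal (l1 ++ l2) e = opsTotal l1 e + opsTotal l2 e := by
  simp [opsTotal]

theorem opsTotal_not_mem {l : List ((String × String) × Int)} {e : String × String}
    (h : e ∉ l.map (fun q => q.1)) : opsTotal l e = 0 := by
  unfold opsTotal
  rw [List.filter_eq_nil_iff.2, List.map_nil, List.sum_nil]
  intro q hq hqe
  exact h (List.mem_map.2 ⟨q, hq, by simpa using hqe⟩)

theorem opsTotal_singleton (q : (String × String) × Int) (e : String × String) :
    opsTotal [q] e = if q.1 = e then q.2 else 0 := by
  unfold opsTotal
  by_cases h : q.1 = e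
  · simp [h]
  · have : (q.1 == e) = false := by simpa using h
    simp [List.filter, this, h]

theorem applyOps_getD (d : PySem.Dict (String × String) Int)
    (ops : List ((String × String) × Int)) (e : String × String) :
    (applyOps d ops).getD e 0 = d.getD e 0 + opsTotal ops e := by
  induction ops using List.reverseRecOn with
  | nil => simp [applyOps, opsTotal]
  | append_singleton ops q ih =>
    rw [applyOps_append]
    show (PySem.Dict.modify (applyOps d ops) q.1 0 (· + q.2)).getD e 0 = _
    rw [PySem.Dict.getD_modify, opsTotal_append, opsTotal_singleton]
    by_cases h : e = q.1
    · rw [if_pos h, ← h, ih, if_pos rfl]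
      ring
    · rw [if_neg h, ih, if_neg (fun hh => h hh.symm), add_zero]

theorem applyOps_keys (d : PySem.Dict (String × String) Int) (hnd : d.keys.Nodup)
    (ops : List ((String × String) × Int)) :
    (applyOps d ops).keys =
      d.keys ++ (PySem.Set.ofList (ops.map (fun q => q.1))).filter (fun e => !(d.contains e)) := by
  induction ops using List.reverseRecOn with
  | nil => simp [applyOps]
  | append_singleton ops q ih =>
    rw [applyOps_append]
    show (PySem.Dict.modify (applyOps d ops) q.1 0 (· + q.2)).keys = _
    unfold PySem.Dict.modify
    rw [List.map_append, List.map_singleton, PySem.Set.ofList_append_singleton,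
      PySem.Set.add_eq_ite]
    by_cases hc : (applyOps d ops).contains q.1 = true
    · rw [PySem.Dict.keys_insert_of_contains _ _ hc, ih]
      have hmem : q.1 ∈ d.keys ∨ q.1 ∈ (PySem.Set.ofList (ops.map (fun q => q.1))) := by
        have := (PySem.Dict.contains_iff_mem_keys _ _).1 hc
        rw [ih] at this
        rcases List.mem_append.1 this with h | h
        · exact Or.inl h
        · exact Or.inr (List.mem_of_mem_filter h)
      by_cases hs : q.1 ∈ PySem.Set.ofList (ops.map (fun q => q.1))
      · rw [if_pos hs]
      · rw [if_neg hs]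
        have hd : d.contains q.1 = true := by
          rcases hmem with h | h
          · exact (PySem.Dict.contains_iff_mem_keys _ _).2 h
          · exact absurd h hs
        rw [List.filter_append]
        simp [hd]
    · have hc' := Bool.not_eq_true _ ▸ hc
      rw [PySem.Dict.keys_insert_of_not_contains _ _ (by simpa using hc), ih]
      have hnotd : d.contains q.1 = false := by
        by_contra hdc
        apply hc
        rw [PySem.Dict.contains_iff_mem_keys, ih]
        exact List.mem_append_left _ ((PySem.Dict.contains_iff_mem_keys _ _).1
          (by simpa using hdc))
      have hnots : q.1 ∉ PySem.Set.ofList (ops.map (fun q => q.1)) := by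
        intro hs
        apply hc
        rw [PySem.Dict.contains_iff_mem_keys, ih]
        refine List.mem_append_right _ (List.mem_filter.2 ⟨hs, by simp [hnotd]⟩)
      rw [if_neg hnots, List.filter_append]
      simp [hnotd]

theorem applyOps_keys_nodup (d : PySem.Dict (String × String) Int) (hnd : d.keys.Nodup)
    (ops : List ((String × String) × Int)) : (applyOps d ops).keys.Nodup := by
  rw [applyOps_keys d hnd ops]
  refine List.Nodup.append hnd ((PySem.Set.nodup_ofList _).filter _) ?_
  intro x hx hfx
  have := List.mem_filter.1 hfx
  have hdc : d.contains x = false := by simpa using this.2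
  exact absurd ((PySem.Dict.contains_iff_mem_keys _ _).2 hx) (by simp [hdc])

theorem applyOps_congr {ops1 ops2 : List ((String × String) × Int)}
    (htot : ∀ e, opsTotal ops1 e = opsTotal ops2 e)
    (hkeys : PySem.Set.ofList (ops1.map (fun q => q.1)) = PySem.Set.ofList (ops2.map (fun q => q.1)))
    (d : PySem.Dict (String × String) Int) (hnd : d.keys.Nodup) :
    applyOps d ops1 = applyOps d ops2 := by
  apply PySem.Dict.ext
  rw [PySem.Dict.items_eq_map_keys _ (applyOps_keys_nodup d hnd ops1) 0,
    PySem.Dict.items_eq_map_keys _ (applyOps_keys_nodup d hnd ops2) 0]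
  rw [applyOps_keys d hnd ops1, applyOps_keys d hnd ops2, hkeys]
  apply List.map_congr_left
  intro k _
  rw [applyOps_getD, applyOps_getD, htot]

-- ===== sides as applyOps =====

theorem walkA_eq (prec : PySem.Dict String (Option String)) (f : Nat)
    (freq : PySem.Dict (String × String) Int) (n : String) :
    walkA prec f freq n = applyOps freq (chainOps prec f n) := by
  induction f generalizing freq n with
  | zero => rfl
  | succ f ih =>
    show (match PySem.Dict.get? prec n with
      | some (some p) =>
        if p = "" then freq
        else walkA prec f (PySem.Dict.modify freq (pvMin n p, pvMax n p) 0 (· + 1)) p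
      | _ => freq) = _
    cases h : PySem.Dict.get? prec n with
    | none =>
      have hep : effPar prec n = none := by unfold effPar; rw [h]
      simp [chainOps, hep, applyOps]
    | some w =>
      cases w with
      | none =>
        have hep : effPar prec n = none := by unfold effPar; rw [h]
        simp [chainOps, hep, applyOps]
      | some p =>
        by_cases hp : p = ""
        · have hep : effPar prec n = none := by unfold effPar; rw [h]; simp [hp]
          simp [hp, chainOps, hep, applyOps]
        · have hep : effPar prec n = some p := by unfold effPar; rw [h]; simp [hp]
          simp only [hp, if_false, ih, chainOps, hep]
          simp [applyOps, edgeOf]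

theorem addStartB_eq (prec : PySem.Dict String (Option String))
    (sz : PySem.Dict String Int) (freq : PySem.Dict (String × String) Int) :
    addStartB prec sz freq = applyOps freq (opsB prec sz) := by
  show prec.keys.foldl _ freq = _
  unfold opsB
  generalize prec.keys = L
  induction L generalizing freq with
  | nil => rfl
  | cons n t ih =>
    rw [List.foldl_cons, List.filterMap_cons]
    have hstep : (match PySem.Dict.get? prec n with
        | some (some p) =>
          if p = "" then freq
          else
            PySem.Dict.insert freq (if n < p then (n, p) else (p, n))
              (freq.getD (if n < p then (n, p) else (p, n)) 0 + sz.getD n 0)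
        | _ => freq) =
        applyOps freq ((effPar prec n).toList.map (fun p => (edgeOf n p, sz.getD n 0))) := by
      unfold effPar
      cases h : PySem.Dict.get? prec n with
      | none => simp [applyOps]
      | some w =>
        cases w with
        | none => simp [applyOps]
        | some p =>
          by_cases hp : p = ""
          · simp [hp, applyOps]
          · simp only [hp, if_false, Option.toList_some, List.map_cons, List.map_nil,
              pair_eq_edgeOf]
            simp [applyOps, applyOps_append, edgeOf, PySem.Dict.modify]
    cases h : effPar prec n with
    | none =>
      rw [h] at hstep
      simp only [Option.toList_none, List.map_nil] at hstep
      have : applyOps freq ([] : List ((String × String) × Int)) = freq := rfl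
      rw [this] at hstep
      rw [hstep]
      exact ih freq
    | some p =>
      rw [h] at hstep
      simp only [Option.toList_some, List.map_cons, List.map_nil] at hstep
      rw [hstep, Option.map_some]
      show _ = applyOps freq ((edgeOf n p, sz.getD n 0) :: t.filterMap _)
      have : (edgeOf n p, sz.getD n 0) :: t.filterMap
          (fun n => (effPar prec n).map (fun p => (edgeOf n p, sz.getD n 0))) =
          [(edgeOf n p, sz.getD n 0)] ++ t.filterMap
          (fun n => (effPar prec n).map (fun p => (edgeOf n p, sz.getD n 0))) := rfl
      rw [this, applyOps_append]
      exact ih _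

theorem walk_fold_eq (prec : PySem.Dict String (Option String))
    (freq : PySem.Dict (String × String) Int) :
    prec.keys.foldl (fun fr n => walkA prec prec.size fr n) freq =
      applyOps freq (prec.keys.flatMap (fun n => chainOps prec prec.size n)) := by
  generalize prec.keys = L
  induction L generalizing freq with
  | nil => rfl
  | cons n t ih =>
    rw [List.foldl_cons, List.flatMap_cons, applyOps_append, walkA_eq]
    exact ih _

-- ===== the two op lists agree =====

theorem opsB_fst {prec : PySem.Dict String (Option String)} {sz : PySem.Dict String Int} :
    (opsB prec sz).map (fun q => q.1) =
      prec.keys.filterMap (fun n => (effPar prec n).map (fun p => edgeOf n p)) := by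
  unfold opsB
  rw [List.map_filterMap]
  apply List.filterMap_congr
  intro n _
  cases h : effPar prec n <;> simp [h]

theorem opsB_fst_nodup {prec : PySem.Dict String (Option String)} (hg : GoodPrec prec)
    {sz : PySem.Dict String Int} : ((opsB prec sz).map (fun q => q.1)).Nodup := by
  rw [opsB_fst]
  have aux : ∀ (L : List String), (∀ n ∈ L, n ∈ prec.keys) → L.Nodup →
      (L.filterMap (fun n => (effPar prec n).map (fun p => edgeOf n p))).Nodup := by
    intro L
    induction L with
    | nil => intro _ _; simp
    | cons n t ih =>
      intro hmem hnd
      rw [List.filterMap_cons]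
      cases h : effPar prec n with
      | none => exact ih (fun x hx => hmem x (List.mem_cons_of_mem _ hx)) (List.nodup_cons.1 hnd).2
      | some p =>
        rw [Option.map_some]
        rw [List.nodup_cons]
        refine ⟨?_, ih (fun x hx => hmem x (List.mem_cons_of_mem _ hx)) (List.nodup_cons.1 hnd).2⟩
        intro hcon
        obtain ⟨c, hc1, hc2⟩ := List.mem_filterMap.1 hcon
        cases hcp : effPar prec c with
        | none => rw [hcp] at hc2; cases hc2
        | some pc =>
          rw [hcp] at hc2
          have he : edgeOf c pc = edgeOf n p := by simpa using hc2
          have : c = n := edgeOf_inj hg (hmem c (List.mem_cons_of_mem _ hc1))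
            (hmem n List.mem_cons_self) hcp h he
          subst this
          exact (List.nodup_cons.1 hnd).1 hc1
  exact aux prec.keys (fun _ h => h) hg.1

theorem chainOps_fst_mem {prec : PySem.Dict String (Option String)} (hg : GoodPrec prec)
    {n : String} (hn : n ∈ prec.keys) :
    ∀ e ∈ (chainOps prec prec.size n).map (fun q => q.1),
      ∃ c, c ∈ nodeChain prec prec.size n ∧ ∃ pc, effPar prec c = some pc ∧ e = edgeOf c pc := by
  have aux : ∀ m : Nat, ∀ n, n ∈ prec.keys → prec.keys.idxOf n = m →
      ∀ e ∈ (chainOps prec prec.size n).map (fun q => q.1),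
      ∃ c, c ∈ nodeChain prec prec.size n ∧ ∃ pc, effPar prec c = some pc ∧ e = edgeOf c pc := by
    intro m
    induction m using Nat.strong_induction_on with
    | _ m ih =>
      intro n hn hm e he
      cases hp : effPar prec n with
      | none => rw [chainOps_none hn hp] at he; simp at he
      | some p =>
        obtain ⟨hpk, hlt⟩ := gp_effPar hg hn hp
        rw [chainOps_step hg hn hp] at he
        rw [nodeChain_step hg hn hp]
        rw [List.map_cons] at he
        rcases List.mem_cons.1 he with h | h
        · exact ⟨n, List.mem_cons_self, p, hp, h⟩
        · obtain ⟨c, hc1, pc, hc2, hc3⟩ := ih (prec.keys.idxOf p) (by omega) p hpk rfl e h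
          exact ⟨c, List.mem_cons_of_mem _ hc1, pc, hc2, hc3⟩
  exact aux (prec.keys.idxOf n) n hn rfl

theorem keys_ofList_aux {prec : PySem.Dict String (Option String)} (hg : GoodPrec prec) :
    ∀ (Q P : List String), prec.keys = P ++ Q →
      PySem.Set.update (P.filterMap (fun n => (effPar prec n).map (fun p => edgeOf n p)))
          (Q.flatMap (fun n => (chainOps prec prec.size n).map (fun q => q.1))) =
        (P ++ Q).filterMap (fun n => (effPar prec n).map (fun p => edgeOf n p)) := by
  intro Q
  induction Q with
  | nil => intro P _; simp [PySem.Set.update]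
  | cons x Q ih =>
    intro P hsplit
    have hsplit' : prec.keys = (P ++ [x]) ++ Q := by simpa using hsplit
    have hx : x ∈ prec.keys := by
      rw [hsplit]; exact List.mem_append_right _ List.mem_cons_self
    have hxP : x ∉ P := by
      have hnd := hg.1
      rw [hsplit] at hnd
      have := List.disjoint_of_nodup_append hnd
      intro hxp
      exact this hxp List.mem_cons_self
    have hPmem : ∀ c ∈ P, c ∈ prec.keys := fun c hc => by
      rw [hsplit]; exact List.mem_append_left _ hc
    have hidx : prec.keys.idxOf x = P.length := by
      have hlen : P.length < prec.keys.length := by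
        rw [hsplit, List.length_append]; simp
      have hget : prec.keys[P.length]'hlen = x := by
        rw [List.getElem_of_eq hsplit]
        rw [List.getElem_append_right (le_refl P.length)]
        simp
      rw [← hget]
      exact hg.1.idxOf_getElem _ _
    rw [List.flatMap_cons, PySem.Set.update_append]
    have hfirst : PySem.Set.update
        (P.filterMap (fun n => (effPar prec n).map (fun p => edgeOf n p)))
        ((chainOps prec prec.size x).map (fun q => q.1)) =
        (P ++ [x]).filterMap (fun n => (effPar prec n).map (fun p => edgeOf n p)) := by
      rw [List.filterMap_append]
      cases hp : effPar prec x with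
      | none =>
        rw [chainOps_none hx hp]
        simp [PySem.Set.update, hp]
      | some p =>
        obtain ⟨hpk, hplt⟩ := gp_effPar hg hx hp
        rw [chainOps_step hg hx hp, List.map_cons, PySem.Set.update_cons]
        have hnotin : edgeOf x p ∉
            P.filterMap (fun n => (effPar prec n).map (fun p => edgeOf n p)) := by
          intro hmem
          obtain ⟨c, hc1, hc2⟩ := List.mem_filterMap.1 hmem
          cases hcp : effPar prec c with
          | none => rw [hcp] at hc2; cases hc2
          | some pc =>
            rw [hcp] at hc2
            have he : edgeOf c pc = edgeOf x p := by simpa using hc2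
            have : c = x := edgeOf_inj hg (hPmem c hc1) hx hcp hp he
            exact hxP (this ▸ hc1)
        rw [PySem.Set.add_of_not_mem hnotin]
        have hsub : ∀ e ∈ (chainOps prec prec.size p).map (fun q => q.1),
            e ∈ P.filterMap (fun n => (effPar prec n).map (fun p => edgeOf n p)) ++ [edgeOf x p] := by
          intro e he
          obtain ⟨c, hc1, pc, hc2, hc3⟩ := chainOps_fst_mem hg hpk e he
          obtain ⟨hcK, hcle⟩ := mem_nodeChain_le hg hpk hc1
          apply List.mem_append_left
          have hcP : c ∈ P := by
            have hidxc : prec.keys.idxOf c < P.length := by omega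
            have : c ∈ prec.keys.take P.length := mem_take_of_idxOf_lt hcK hidxc
            have htakeP : prec.keys.take P.length = P := by
              rw [hsplit]
              exact List.take_left' rfl
            rwa [htakeP] at this
          exact List.mem_filterMap.2 ⟨c, hcP, by simp [hc2, hc3]⟩
        rw [PySem.Set.update_eq_append_filter]
        have hnil : ∀ e ∈ PySem.Set.ofList ((chainOps prec prec.size p).map (fun q => q.1)),
            ¬((!PySem.Set.contains
              (P.filterMap (fun n => (effPar prec n).map (fun p => edgeOf n p)) ++ [edgeOf x p]) e) = true) := by
          intro e hee
          have he2 : e ∈ (chainOps prec prec.size p).map (fun q => q.1) :=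
            (PySem.Set.mem_ofList _ _).1 hee
          have hm := hsub e he2
          have hcont : PySem.Set.contains
              (P.filterMap (fun n => (effPar prec n).map (fun p => edgeOf n p)) ++ [edgeOf x p]) e = true := by
            rw [PySem.Set.contains_eq_listContains]
            exact List.elem_eq_true_of_mem hm
          rw [hcont]
          simp
        rw [List.filter_eq_nil_iff.2 hnil, List.append_nil]
        simp [hp]
    rw [hfirst]
    have := ih (P ++ [x]) hsplit'
    rw [this]
    simp

theorem keys_ofList_eq {prec : PySem.Dict String (Option String)} (hg : GoodPrec prec)
    (sz : PySem.Dict String Int) :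
    PySem.Set.ofList (((prec.keys.flatMap (fun n => chainOps prec prec.size n))).map (fun q => q.1)) =
      (opsB prec sz).map (fun q => q.1) := by
  rw [opsB_fst]
  rw [List.map_flatMap]
  have h0 := keys_ofList_aux hg prec.keys [] (by simp)
  simpa [PySem.Set.update_nil_left] using h0

theorem opsTotal_flatMap (L : List String) (f : String → List ((String × String) × Int))
    (e : String × String) :
    opsTotal (L.flatMap f) e = (L.map (fun n => opsTotal (f n) e)).sum := by
  induction L with
  | nil => simp [opsTotal]
  | cons n t ih => rw [List.flatMap_cons, opsTotal_append, ih, List.map_cons, List.sum_cons]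

theorem chainOps_snd (prec : PySem.Dict String (Option String)) (f : Nat) (n : String) :
    ∀ q ∈ chainOps prec f n, q.2 = 1 := by
  induction f generalizing n with
  | zero => intro q hq; simp [chainOps] at hq
  | succ f ih =>
    intro q hq
    unfold chainOps at hq
    cases hp : effPar prec n with
    | none => rw [hp] at hq; simp at hq
    | some p =>
      rw [hp] at hq
      rcases List.mem_cons.1 hq with h | h
      · rw [h]
      · exact ih p q h

theorem opsTotal_count {ops : List ((String × String) × Int)}
    (h1 : ∀ q ∈ ops, q.2 = 1) (e : String × String) :
    opsTotal ops e = (((ops.map (fun q => q.1)).count e : Nat) : Int) := by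
  induction ops with
  | nil => simp [opsTotal]
  | cons q t ih =>
    have hq1 : q.2 = 1 := h1 q List.mem_cons_self
    have ht : ∀ r ∈ t, r.2 = 1 := fun r hr => h1 r (List.mem_cons_of_mem _ hr)
    unfold opsTotal
    rw [List.filter_cons]
    by_cases hqe : q.1 = e
    · have hb : (q.1 == e) = true := by simpa using hqe
      rw [hb]
      simp only [if_true, List.map_cons, List.sum_cons]
      have := ih ht
      unfold opsTotal at this
      rw [this, hq1]
      simp only [List.map_cons, List.count_cons, hb, if_true]
      push_cast
      ring
    · have hb : (q.1 == e) = false := by simpa using hqe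
      rw [hb]
      simp only [Bool.false_eq_true, if_false]
      have := ih ht
      unfold opsTotal at this
      rw [this]
      simp only [List.map_cons, List.count_cons, hb]
      simp

theorem opsTotal_of_nodup_mem {ops : List ((String × String) × Int)} {e : String × String}
    {w : Int} (hnd : (ops.map (fun q => q.1)).Nodup) (hm : (e, w) ∈ ops) :
    opsTotal ops e = w := by
  induction ops with
  | nil => simp at hm
  | cons q t ih =>
    rw [List.map_cons, List.nodup_cons] at hnd
    unfold opsTotal
    rw [List.filter_cons]
    by_cases hqe : q.1 = e
    · have hq : q = (e, w) := by
        rcases List.mem_cons.1 hm with h | h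
        · exact h.symm
        · exfalso
          exact hnd.1 (hqe ▸ List.mem_map.2 ⟨(e, w), h, by simp [hqe]⟩)
      have hb : (q.1 == e) = true := by simpa using hqe
      rw [hb]
      simp only [if_true, List.map_cons, List.sum_cons]
      have hz : opsTotal t e = 0 := by
        apply opsTotal_not_mem
        rw [hq] at hnd
        simpa using hnd.1
      unfold opsTotal at hz
      rw [hz, hq]
      simp
    · have hb : (q.1 == e) = false := by simpa using hqe
      rw [hb]
      simp only [Bool.false_eq_true, if_false]
      have hm' : (e, w) ∈ t := by
        rcases List.mem_cons.1 hm with h | h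
        · exact absurd (by rw [← h]) hqe
        · exact h
      have := ih hnd.2 hm'
      unfold opsTotal at this
      exact this

theorem totals_eq {prec : PySem.Dict String (Option String)} (hg : GoodPrec prec) (e : String × String) :
    opsTotal (prec.keys.flatMap (fun n => chainOps prec prec.size n)) e =
      opsTotal (opsB prec (sizesB prec)) e := by
  by_cases he : e ∈ (opsB prec (sizesB prec)).map (fun q => q.1)
  · rw [opsB_fst] at he
    obtain ⟨v, hvK, hv2⟩ := List.mem_filterMap.1 he
    cases hpv : effPar prec v with
    | none => rw [hpv] at hv2; cases hv2
    | some pv =>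
      rw [hpv] at hv2
      have hev : e = edgeOf v pv := by simpa using hv2.symm
      subst hev
      rw [opsTotal_flatMap]
      have hmapeq : prec.keys.map
          (fun n => opsTotal (chainOps prec prec.size n) (edgeOf v pv)) =
          prec.keys.map (fun n =>
            ((if (nodeChain prec prec.size n).contains v then (1 : Int) else 0))) := by
        apply List.map_congr_left
        intro n hn
        rw [opsTotal_count (chainOps_snd prec prec.size n), chainOps_count hg hvK hpv hn]
        by_cases hm : v ∈ nodeChain prec prec.size n
        · rw [if_pos hm, if_pos (by simpa using hm)]
          simp
        · rw [if_neg hm, if_neg (by simpa using hm)]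
          simp
      rw [hmapeq, PySem.List.sum_map_ite_one_zero]
      have hRc : (prec.keys.countP (fun n => (nodeChain prec prec.size n).contains v) : Int)
          = Rcnt prec v := rfl
      have hB : opsTotal (opsB prec (sizesB prec)) (edgeOf v pv) = (sizesB prec).getD v 0 := by
        apply opsTotal_of_nodup_mem (opsB_fst_nodup hg)
        unfold opsB
        exact List.mem_filterMap.2 ⟨v, hvK, by simp [hpv]⟩
      rw [hB, sizesB_eq_Rcnt hg hvK]
      exact hRc
  · have heA : e ∉ (prec.keys.flatMap (fun n => chainOps prec prec.size n)).map (fun q => q.1) := by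
      intro hmem
      apply he
      have h1 : e ∈ PySem.Set.ofList
          ((prec.keys.flatMap (fun n => chainOps prec prec.size n)).map (fun q => q.1)) :=
        (PySem.Set.mem_ofList _ _).2 hmem
      rw [keys_ofList_eq hg (sizesB prec)] at h1
      exact h1
    rw [opsTotal_not_mem heA, opsTotal_not_mem he]

theorem perStart {prec : PySem.Dict String (Option String)} (hg : GoodPrec prec)
    (freq : PySem.Dict (String × String) Int) (hnd : freq.keys.Nodup) :
    prec.keys.foldl (fun fr n => walkA prec prec.size fr n) freq =
      addStartB prec (sizesB prec) freq := by
  rw [walk_fold_eq, addStartB_eq]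
  apply applyOps_congr (totals_eq hg) _ freq hnd
  rw [keys_ofList_eq hg (sizesB prec)]
  exact (PySem.Set.ofList_eq_self_of_nodup _ (opsB_fst_nodup hg)).symm

-- ===== the BFS result is a GoodPrec =====

theorem bfsA_good (graph : PySem.Dict String (List String)) (f : Nat)
    (q : List (String × Option String)) (prec : PySem.Dict String (Option String))
    (hg : GoodPrec prec)
    (hq : ∀ e ∈ q, ∀ p, e.2 = some p → p ∈ prec.keys) :
    GoodPrec (bfsA graph f q prec) := by
  induction f generalizing q prec with
  | zero => exact hg
  | succ f ih =>
    cases q with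
    | nil => exact hg
    | cons hd t =>
      obtain ⟨node, prev⟩ := hd
      show GoodPrec (if PySem.Dict.contains prec node then bfsA graph f t prec
        else _)
      by_cases hc : PySem.Dict.contains prec node = true
      · rw [if_pos hc]
        exact ih t prec hg (fun e he p hp => hq e (List.mem_cons_of_mem _ he) p hp)
      · rw [if_neg hc]
        have hcf : PySem.Dict.contains prec node = false := by simpa using hc
        have hkeys' : (prec.insert node prev).keys = prec.keys ++ [node] :=
          PySem.Dict.keys_insert_of_not_contains _ _ hcf
        have hitems' : (prec.insert node prev).items = prec.items ++ [(node, prev)] :=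
          PySem.Dict.items_insert_of_not_contains _ _ hcf
        have hnotmem : node ∉ prec.keys := fun hm =>
          hc ((PySem.Dict.contains_iff_mem_keys _ _).2 hm)
        have hg' : GoodPrec (prec.insert node prev) := by
          constructor
          · rw [hkeys']
            exact List.Nodup.append hg.1 (List.nodup_singleton _)
              (by intro x hx hx2
                  rw [List.mem_singleton] at hx2
                  exact hnotmem (hx2 ▸ hx))
          · intro i hlen p hp
            rw [hitems'] at hlen
            rw [List.length_append, List.length_singleton] at hlen
            by_cases hi : i < prec.items.length
            · rw [List.getElem_of_eq hitems', List.getElem_append_left hi] at hp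
              have := hg.2 i hi p hp
              rw [hitems']
              rw [List.take_append_of_le_length (by omega)]
              exact this
            · have hieq : i = prec.items.length := by omega
              subst hieq
              rw [List.getElem_of_eq hitems',
                List.getElem_append_right (le_refl _)] at hp
              simp only [Nat.sub_self, List.getElem_singleton] at hp
              have hpk : p ∈ prec.keys := hq (node, prev) List.mem_cons_self p (by simpa using hp)
              rw [hitems', List.take_append_of_le_length (le_refl _), List.take_length]
              exact hpk
        apply ih _ _ hg'
        intro e he p hp
        rcases List.mem_append.1 he with h | h
        · have := hq e (List.mem_cons_of_mem _ h) p hp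
          rw [hkeys']
          exact List.mem_append_left _ this
        · obtain ⟨nx, hnx1, hnx2⟩ := List.mem_map.1 h
          rw [← hnx2] at hp
          simp only at hp
          injection hp with hp
          rw [hkeys', ← hp]
          exact List.mem_append_right _ List.mem_cons_self

-- ===== glue =====

theorem goodPrec_empty : GoodPrec (PySem.Dict.empty : PySem.Dict String (Option String)) := by
  constructor
  · exact PySem.Dict.nodup_keys_empty
  · intro i h
    simp [PySem.Dict.empty] at h

theorem findCritical_eq (graph : PySem.Dict String (List String)) :
    findCriticalA graph = findCriticalB graph := by
  have key : ∀ (L : List String) (freq : PySem.Dict (String × String) Int), freq.keys.Nodup →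
      L.foldl (fun freq start =>
        let prec := bfsA graph (bfsFuelA graph) [(start, none)] PySem.Dict.empty
        (PySem.Dict.keys prec).foldl (fun freq node => walkA prec (PySem.Dict.size prec) freq node) freq) freq =
      L.foldl (fun freq start =>
        let prec := bfsB graph (bfsFuelB graph) [(start, none)] 0 PySem.Dict.empty
        addStartB prec (sizesB prec) freq) freq := by
    intro L
    induction L with
    | nil => intro freq _; rfl
    | cons s t ih =>
      intro freq hnd
      rw [List.foldl_cons, List.foldl_cons]
      have hbfs : bfsB graph (bfsFuelB graph) [(s, none)] 0 PySem.Dict.empty =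
          bfsA graph (bfsFuelA graph) [(s, none)] PySem.Dict.empty := by
        rw [bfsB_drop graph _ _ 0 _ (by simp), List.drop_zero, bfsFuelB_eq]
      have hgp : GoodPrec (bfsA graph (bfsFuelA graph) [(s, none)] PySem.Dict.empty) := by
        apply bfsA_good graph _ _ _ goodPrec_empty
        intro e he p hp
        rw [List.mem_singleton] at he
        rw [he] at hp
        cases hp
      show t.foldl _ ((PySem.Dict.keys (bfsA graph (bfsFuelA graph) [(s, none)] PySem.Dict.empty)).foldl
          (fun freq node => walkA _ (PySem.Dict.size _) freq node) freq) =
        t.foldl _ (addStartB (bfsB graph (bfsFuelB graph) [(s, none)] 0 PySem.Dict.empty)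
          (sizesB (bfsB graph (bfsFuelB graph) [(s, none)] 0 PySem.Dict.empty)) freq)
      rw [hbfs]
      rw [perStart hgp freq hnd]
      apply ih
      rw [addStartB_eq]
      exact applyOps_keys_nodup freq hnd _
  unfold findCriticalA findCriticalB
  rw [key (PySem.Dict.keys graph) PySem.Dict.empty PySem.Dict.nodup_keys_empty]
  rfl

-- ===== VERDICT =====
theorem parse_spec : Claim_equal_parse := by
  intro lines _ _
  show parse lines = parse_alt lines
  simp only [parse, parse_alt, buildGraphB_eq, findCritical_eq]
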